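-- pv_equiv track=rewrite | github.com/anttru/idioma_de__la_P | opo.py | from_p
-- ===== SOURCE A (Python) =====
-- def from_p(sentence):
--     cypher = {"apa" : "a", "epe" : "e", "ipi" : "i", "opo" : "o", "upu" : "u"}
--     translation = ""
--     position = 0
--     if sentence != "":
--         while position < len(sentence):
--             if position < len(sentence) - 2:
--                 if sentence[position : position + 3] in cypher:
--                     translation += cypher[sentence[position : position + 3]]
--                     position += 2
--                 else:
--                     translation +=  sentence[position]
--             else:
--                 translation += sentence[position]
--             position += 1
--     else:
--         translation = ""
--
--     return translation
-- ===== SOURCE B (Python) =====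
-- import re
--
-- _P = re.compile(r"apa|epe|ipi|opo|upu")
--
-- def from_p(sentence):
--     return _P.sub(lambda m: m.group()[0], sentence)
-- ===== Notes on version B (the rewrite author's own statement) =====
-- stated objective: idiomatic
-- what changed: Replaced A's manual index-walking while-loop with dict lookups and per-character string concatenation by a single precompiled regex substitution (alternation of the five encoded triples, each replaced by its first character).
import Mathlib
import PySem

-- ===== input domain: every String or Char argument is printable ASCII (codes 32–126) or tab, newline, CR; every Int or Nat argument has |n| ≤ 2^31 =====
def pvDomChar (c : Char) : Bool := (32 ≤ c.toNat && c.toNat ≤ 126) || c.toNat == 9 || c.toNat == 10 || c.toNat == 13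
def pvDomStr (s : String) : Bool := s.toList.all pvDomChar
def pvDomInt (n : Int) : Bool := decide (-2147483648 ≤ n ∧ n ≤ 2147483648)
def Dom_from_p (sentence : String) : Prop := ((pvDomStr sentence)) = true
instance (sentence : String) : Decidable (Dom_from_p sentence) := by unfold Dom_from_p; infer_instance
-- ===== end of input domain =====

-- B replaces A's manual index-walking loop with one regex substitution (alternation of the five
-- encoded triples, each replaced by its first character); objective: idiomatic, same O(n) cost.

-- ===== PORT A =====
-- A's cypher dict, keys/values as char lists (Python strings).
def pvCypher : PySem.Dict (List Char) (List Char) := PySem.Dict.ofList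
  [(['a','p','a'], ['a']), (['e','p','e'], ['e']), (['i','p','i'], ['i']),
   (['o','p','o'], ['o']), (['u','p','u'], ['u'])]

-- A's while loop: position-indexed scan accumulating `translation`.
def fromPLoop (cs : List Char) (pos : Nat) (acc : List Char) : List Char :=
  if _h : pos < cs.length then
    if (pos : Int) < (cs.length : Int) - 2 then
      match PySem.Dict.get? pvCypher (PySem.List.slice cs (some (pos : Int)) (some ((pos : Int) + 3))) with
      | some v => fromPLoop cs (pos + 2 + 1) (acc ++ v)
      | none => fromPLoop cs (pos + 1) (acc ++ [PySem.List.pyGetD cs (pos : Int) ' '])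
    else fromPLoop cs (pos + 1) (acc ++ [PySem.List.pyGetD cs (pos : Int) ' '])
  else acc
termination_by cs.length - pos

def from_p (sentence : String) : String :=
  if sentence ≠ "" then String.ofList (fromPLoop sentence.toList 0 [])
  else ""

-- ===== PORT B =====
-- re.sub(r'apa|epe|ipi|opo|upu', lambda m: m.group()[0], sentence): leftmost non-overlapping scan;
-- at each position try the alternation (five literal triples), on a match emit the first char of the
-- match and continue after it, otherwise keep the char and move on by one. Exact regex-sub semantics.
def pSub (cs : List Char) : List Char :=
  match cs with
  | c1 :: c2 :: c3 :: rest =>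
    if [c1, c2, c3] = ['a','p','a'] ∨ [c1, c2, c3] = ['e','p','e'] ∨ [c1, c2, c3] = ['i','p','i'] ∨
       [c1, c2, c3] = ['o','p','o'] ∨ [c1, c2, c3] = ['u','p','u'] then
      c1 :: pSub rest
    else
      c1 :: pSub (c2 :: c3 :: rest)
  | xs => xs
termination_by cs.length
decreasing_by all_goals simp <;> omega

def from_p_alt (sentence : String) : String := String.ofList (pSub sentence.toList)

-- ===== PRECONDITION & SPEC =====
def Spec_from_p (sentence : String) (out : String) : Prop := out = from_p_alt sentence
instance (sentence : String) (out : String) : Decidable (Spec_from_p sentence out) := by unfold Spec_from_p; infer_instance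

-- ===== CLAIM (what is proved, stated in full; the proofs are below) =====
def Claim_equal_from_p : Prop := ∀ (sentence : String), Dom_from_p sentence → Spec_from_p sentence (from_p sentence)

-- ===== LEMMAS AND PROOFS =====

theorem pvCypher_mk : pvCypher = PySem.Dict.mk [(['a','p','a'], ['a']), (['e','p','e'], ['e']), (['i','p','i'], ['i']),
   (['o','p','o'], ['o']), (['u','p','u'], ['u'])] := by decide

def pMatch (c1 c2 c3 : Char) : Prop :=
  [c1,c2,c3]=['a','p','a'] ∨ [c1,c2,c3]=['e','p','e'] ∨ [c1,c2,c3]=['i','p','i'] ∨ [c1,c2,c3]=['o','p','o'] ∨ [c1,c2,c3]=['u','p','u']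

theorem cypher_some (c1 c2 c3 : Char) (v : List Char) (h : pvCypher.get? [c1,c2,c3] = some v) :
    v = [c1] ∧ pMatch c1 c2 c3 := by
  rw [pvCypher_mk] at h
  simp [PySem.Dict.get?_mk_cons] at h
  unfold pMatch
  split_ifs at h with h1 h2 h3 h4 h5
  · obtain ⟨rfl, rfl, rfl⟩ := h1; simp at h; simp [h]
  · obtain ⟨rfl, rfl, rfl⟩ := h2; simp at h; simp [h]
  · obtain ⟨rfl, rfl, rfl⟩ := h3; simp at h; simp [h]
  · obtain ⟨rfl, rfl, rfl⟩ := h4; simp at h; simp [h]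
  · obtain ⟨rfl, rfl, rfl⟩ := h5; simp at h; simp [h]
  · simp [PySem.Dict.get?] at h

theorem cypher_none (c1 c2 c3 : Char) (h : pvCypher.get? [c1,c2,c3] = none) :
    ¬ pMatch c1 c2 c3 := by
  rw [pvCypher_mk] at h
  simp [PySem.Dict.get?_mk_cons] at h
  unfold pMatch
  split_ifs at h with h1 h2 h3 h4 h5
  rintro (⟨rfl,rfl,rfl⟩|⟨rfl,rfl,rfl⟩|⟨rfl,rfl,rfl⟩|⟨rfl,rfl,rfl⟩|⟨rfl,rfl,rfl⟩) <;> simp_all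

theorem pSub_match (c1 c2 c3 : Char) (rest : List Char) (hm : pMatch c1 c2 c3) :
    pSub (c1 :: c2 :: c3 :: rest) = c1 :: pSub rest := by
  unfold pMatch at hm
  rw [pSub, if_pos hm]

theorem pSub_nomatch (c1 c2 c3 : Char) (rest : List Char) (hm : ¬ pMatch c1 c2 c3) :
    pSub (c1 :: c2 :: c3 :: rest) = c1 :: pSub (c2 :: c3 :: rest) := by
  unfold pMatch at hm
  rw [pSub, if_neg hm]

theorem pSub_short (xs : List Char) (h : xs.length ≤ 2) : pSub xs = xs := by
  match xs, h with
  | [], _ => simp [pSub]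
  | [a], _ => simp [pSub]
  | [a, b], _ => simp [pSub]

theorem drop_three (cs : List Char) (pos : Nat) (h : pos + 3 ≤ cs.length) :
    ∃ c1 c2 c3 rest, List.drop pos cs = c1 :: c2 :: c3 :: rest ∧
      List.drop (pos + 1) cs = c2 :: c3 :: rest ∧ List.drop (pos + 2 + 1) cs = rest ∧
      PySem.List.slice cs (some (pos : Int)) (some ((pos : Int) + 3)) = [c1, c2, c3] ∧
      PySem.List.pyGetD cs (pos : Int) ' ' = c1 := by
  have hd0 : List.drop pos cs = cs[pos] :: List.drop (pos+1) cs := List.drop_eq_getElem_cons (by omega)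
  have hd1 : List.drop (pos+1) cs = cs[pos+1] :: List.drop (pos+2) cs := List.drop_eq_getElem_cons (by omega)
  have hd2 : List.drop (pos+2) cs = cs[pos+2] :: List.drop (pos+3) cs := List.drop_eq_getElem_cons (by omega)
  refine ⟨cs[pos], cs[pos+1], cs[pos+2], List.drop (pos+3) cs, ?_, ?_, ?_, ?_, ?_⟩
  · rw [hd0, hd1, hd2]
  · rw [hd1, hd2]
  · norm_num
  · rw [PySem.List.slice_toNat cs (by omega) (by omega)]
    have hsub : ((pos : Int) + 3).toNat - ((pos : Int)).toNat = 3 := by omega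
    rw [hsub, Int.toNat_natCast, hd0, hd1, hd2]
    rfl
  · exact PySem.List.pyGetD_ofNat cs pos ' ' (by omega)

theorem fromPLoop_eq_pSub (cs : List Char) (pos : Nat) (acc : List Char) (hpos : pos ≤ cs.length) :
    fromPLoop cs pos acc = acc ++ pSub (List.drop pos cs) := by
  induction pos, acc using fromPLoop.induct cs with
  | case1 pos acc hlt hcond v hget ih =>
    obtain ⟨c1, c2, c3, rest, hd0, hd1, hd3, hslice, hgetd⟩ := drop_three cs pos (by omega)
    rw [hslice] at hget
    obtain ⟨rfl, hm⟩ := cypher_some _ _ _ _ hget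
    rw [fromPLoop]
    simp only [dif_pos hlt, if_pos hcond, hslice, hget]
    rw [ih (by omega), hd3, hd0, pSub_match _ _ _ _ hm]
    simp
  | case2 pos acc hlt hcond hget ih =>
    obtain ⟨c1, c2, c3, rest, hd0, hd1, hd3, hslice, hgetd⟩ := drop_three cs pos (by omega)
    rw [hslice] at hget
    have hm := cypher_none _ _ _ hget
    rw [fromPLoop]
    simp only [dif_pos hlt, if_pos hcond, hslice, hget]
    rw [ih (by omega), hgetd, hd1, hd0, pSub_nomatch _ _ _ _ hm]
    simp
  | case3 pos acc hlt hcond ih =>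
    rw [fromPLoop]
    simp only [dif_pos hlt, if_neg hcond]
    rw [ih (by omega), PySem.List.pyGetD_ofNat cs pos ' ' hlt,
        pSub_short (List.drop (pos+1) cs) (by simp; omega),
        pSub_short (List.drop pos cs) (by simp; omega),
        List.drop_eq_getElem_cons hlt]
    simp
  | case4 pos acc hge =>
    rw [fromPLoop]
    simp only [dif_neg hge]
    rw [List.drop_eq_nil_of_le (by omega), pSub_short [] (by simp)]
    simp

-- ===== VERDICT (by name: the statement is the Claim_ definition above) =====
theorem from_p_spec : Claim_equal_from_p := by
  intro s _
  unfold Spec_from_p from_p from_p_alt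
  by_cases h : s = ""
  · subst h; simp [pSub]
  · simp [h, fromPLoop_eq_pSub s.toList 0 [] (by omega)]
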